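-- pv_equiv track=rewrite | github.com/mehmeteminkilic/Python-Coding-Journey | iPy16.py | interpret4
-- ===== SOURCE A (Python) =====
-- def interpret4(command:str):
--     interpret = ""
--     i = 0
--     while i < len(command):
--         if command[i] == 'G':
--             interpret += 'G'
--             i = i + 1
--         elif command[i:i+2] == '()':
--             interpret += 'o'
--             i = i + 2
--         elif command[i:i+4] == '(al)':
--             interpret += 'al'
--             i = i + 4
--         else:
--             i = i + 1
--     return interpret
-- ===== SOURCE B (Python) =====
-- def interpret4(command: str):
--     # One pass, character by character, with a small automaton whose integer state
--     # records how many characters of a bracketed token are currently pending (0-3).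
--     out = []
--     state = 0
--     for c in command:
--         if c == 'G':
--             out.append('G')
--             state = 0
--         elif c == '(':
--             state = 1
--         elif state == 1 and c == ')':
--             out.append('o')
--             state = 0
--         elif state == 1 and c == 'a':
--             state = 2
--         elif state == 2 and c == 'l':
--             state = 3
--         elif state == 3 and c == ')':
--             out.append('al')
--             state = 0
--         else:
--             state = 0
--     return ''.join(out)
-- ===== Notes on version B (the rewrite author's own statement) =====
-- stated objective: faster
-- what changed: Replaced A's index-jumping scanner that compares freshly built slices (command[i:i+2], command[i:i+4]) at every position by a single character-at-a-time finite automaton whose integer state records how much of a token is pending, so no slice objects are ever created.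
import Mathlib
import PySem

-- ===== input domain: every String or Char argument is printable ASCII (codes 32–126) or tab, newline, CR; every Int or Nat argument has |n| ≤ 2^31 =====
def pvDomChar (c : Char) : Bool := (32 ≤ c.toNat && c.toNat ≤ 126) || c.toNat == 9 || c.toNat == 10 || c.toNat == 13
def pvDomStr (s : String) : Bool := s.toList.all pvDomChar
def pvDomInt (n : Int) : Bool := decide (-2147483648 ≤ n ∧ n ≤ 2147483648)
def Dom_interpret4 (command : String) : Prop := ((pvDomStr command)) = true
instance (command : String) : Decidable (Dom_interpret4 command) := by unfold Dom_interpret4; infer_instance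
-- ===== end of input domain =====

-- B replaces A's slice-comparing, index-jumping scanner by a character-at-a-time
-- automaton whose state counts the pending token characters (measured faster: no slices built).

-- ===== PORT A =====
-- A's while-loop over index i with a growing string accumulator; command[i:i+k] is take k of drop i (i ≥ 0).
def interpret4Loop (cs : List Char) (i : Nat) (acc : List Char) : List Char :=
  if i < cs.length then
    if cs[i]! = 'G' then interpret4Loop cs (i + 1) (acc ++ ['G'])
    else if (cs.drop i).take 2 = ['(', ')'] then interpret4Loop cs (i + 2) (acc ++ ['o'])
    else if (cs.drop i).take 4 = ['(', 'a', 'l', ')'] then interpret4Loop cs (i + 4) (acc ++ ['a', 'l'])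
    else interpret4Loop cs (i + 1) acc
  else acc
termination_by cs.length - i

def interpret4 (command : String) : String :=
  String.mk (interpret4Loop command.toList 0 [])

-- ===== PORT B =====
-- B's per-character transition: the elif chain over (state, c); returns (new state, emitted chars).
def dfaStep (s : Nat) (c : Char) : Nat × List Char :=
  if c = 'G' then (0, ['G'])
  else if c = '(' then (1, [])
  else if s = 1 ∧ c = ')' then (0, ['o'])
  else if s = 1 ∧ c = 'a' then (2, [])
  else if s = 2 ∧ c = 'l' then (3, [])
  else if s = 3 ∧ c = ')' then (0, ['a', 'l'])
  else (0, [])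

-- B's 'for c in command' loop carrying (state, out).
def interpret4AltLoop : List Char → Nat → List Char → List Char
  | [], _, acc => acc
  | c :: rest, s, acc => interpret4AltLoop rest (dfaStep s c).1 (acc ++ (dfaStep s c).2)

-- ''.join(out)
def interpret4_alt (command : String) : String :=
  String.mk (interpret4AltLoop command.toList 0 [])

-- ===== PRECONDITION & SPEC =====
def Spec_interpret4 (command : String) (out : String) : Prop := out = interpret4_alt command
instance (command : String) (out : String) : Decidable (Spec_interpret4 command out) := by unfold Spec_interpret4; infer_instance

-- ===== CLAIM (what is proved, stated in full; the proofs are below) =====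
def Claim_equal_interpret4 : Prop := ∀ (command : String), Dom_interpret4 command → Spec_interpret4 command (interpret4 command)

-- ===== LEMMAS AND PROOFS =====

-- the token prefix pending in automaton state s
def pend : Nat → List Char
  | 1 => ['(']
  | 2 => ['(', 'a']
  | 3 => ['(', 'a', 'l']
  | _ => []

theorem drop_cons {cs : List Char} {i : Nat} {c : Char} {tail : List Char}
    (h : cs.drop i = c :: tail) : cs.drop (i + 1) = tail := by
  have := congrArg (List.drop 1) h
  simpa [List.drop_drop, Nat.add_comm] using this

theorem loopA_nil {cs : List Char} {i : Nat} (h : cs.drop i = []) (acc : List Char) :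
    interpret4Loop cs i acc = acc := by
  have hge : ¬ i < cs.length := by
    have := congrArg List.length h; simp at this; omega
  rw [interpret4Loop, if_neg hge]

theorem loopA_step {cs : List Char} {i : Nat} {c : Char} {tail : List Char}
    (h : cs.drop i = c :: tail) (acc : List Char) :
    interpret4Loop cs i acc =
      if c = 'G' then interpret4Loop cs (i + 1) (acc ++ ['G'])
      else if (c :: tail).take 2 = ['(', ')'] then interpret4Loop cs (i + 2) (acc ++ ['o'])
      else if (c :: tail).take 4 = ['(', 'a', 'l', ')'] then interpret4Loop cs (i + 4) (acc ++ ['a', 'l'])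
      else interpret4Loop cs (i + 1) acc := by
  have hlt : i < cs.length := by
    have := congrArg List.length h; simp at this; omega
  have hc : cs[i]! = c := by
    have h0 : (cs.drop i)[0]'(by simp [h]) = c := by simp [h]
    rw [List.getElem_drop] at h0
    simp [getElem!_pos, hlt, ← h0]
  rw [interpret4Loop, if_pos hlt, hc, h]

theorem main_inv (cs : List Char) :
    ∀ (rest : List Char) (i s : Nat) (acc : List Char), s ≤ 3 →
      cs.drop i = pend s ++ rest →
      interpret4Loop cs i acc = interpret4AltLoop rest s acc := by
  intro rest
  induction rest with
  | nil =>
    intro i s acc hs h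
    simp only [List.append_nil] at h
    interval_cases s <;> simp only [pend] at h <;> rw [interpret4AltLoop]
    · exact loopA_nil h acc
    · rw [loopA_step h]; simp only [List.take]; simp
      exact loopA_nil (drop_cons h) acc
    · rw [loopA_step h]; simp only [List.take]; simp
      rw [loopA_step (drop_cons h)]; simp only [List.take]; simp
      exact loopA_nil (drop_cons (drop_cons h)) acc
    · rw [loopA_step h]; simp only [List.take]; simp
      rw [loopA_step (drop_cons h)]; simp only [List.take]; simp
      rw [loopA_step (drop_cons (drop_cons h))]; simp only [List.take]; simp
      exact loopA_nil (drop_cons (drop_cons (drop_cons h))) acc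
  | cons c rest' ih =>
    intro i s acc hs h
    rw [interpret4AltLoop]
    interval_cases s <;> simp only [pend, List.nil_append, List.cons_append] at h
    · -- state 0: drop i = c :: rest'
      by_cases hG : c = 'G'
      · subst hG
        rw [loopA_step h]; simp [dfaStep]
        exact ih (i + 1) 0 (acc ++ ['G']) (by omega) (by simpa [pend] using drop_cons h)
      · by_cases hP : c = '('
        · subst hP
          simp [dfaStep]
          exact ih i 1 acc (by omega) (by simpa [pend] using h)
        · rw [loopA_step h]; simp [List.take, dfaStep, hG, hP]
          exact ih (i + 1) 0 acc (by omega) (by simpa [pend] using drop_cons h)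
    · -- state 1: drop i = '(' :: c :: rest'
      have h1 : cs.drop (i + 1) = c :: rest' := drop_cons h
      by_cases hG : c = 'G'
      · subst hG
        rw [loopA_step h]; simp only [List.take]; simp
        rw [loopA_step h1]; simp [dfaStep]
        exact ih (i + 2) 0 (acc ++ ['G']) (by omega)
          (by simpa [pend, show i + 1 + 1 = i + 2 by omega] using drop_cons h1)
      · by_cases hP : c = '('
        · subst hP
          rw [loopA_step h]; simp only [List.take]; simp
          simp [dfaStep]
          exact ih (i + 1) 1 acc (by omega) (by simpa [pend] using h1)
        · by_cases hR : c = ')'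
          · subst hR
            rw [loopA_step h]; simp only [List.take]; simp
            simp [dfaStep]
            exact ih (i + 2) 0 (acc ++ ['o']) (by omega)
              (by simpa [pend, show i + 1 + 1 = i + 2 by omega] using drop_cons h1)
          · by_cases hA : c = 'a'
            · subst hA
              simp [dfaStep]
              exact ih i 2 acc (by omega) (by simpa [pend] using h)
            · rw [loopA_step h]; simp only [List.take]; simp [hR, hA]
              rw [loopA_step h1]; simp [List.take, dfaStep, hG, hP, hR, hA]
              exact ih (i + 2) 0 acc (by omega)
                (by simpa [pend, show i + 1 + 1 = i + 2 by omega] using drop_cons h1)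
    · -- state 2: drop i = '(' :: 'a' :: c :: rest'
      have h1 : cs.drop (i + 1) = 'a' :: c :: rest' := drop_cons h
      have h2 : cs.drop (i + 2) = c :: rest' := by
        simpa [show i + 1 + 1 = i + 2 by omega] using drop_cons h1
      by_cases hG : c = 'G'
      · subst hG
        rw [loopA_step h]; simp only [List.take]; simp
        rw [loopA_step h1]; simp only [List.take]; simp
        rw [loopA_step h2]; simp [dfaStep]
        exact ih (i + 3) 0 (acc ++ ['G']) (by omega)
          (by simpa [pend, show i + 2 + 1 = i + 3 by omega] using drop_cons h2)
      · by_cases hP : c = '('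
        · subst hP
          rw [loopA_step h]; simp only [List.take]; simp
          rw [loopA_step h1]; simp only [List.take]; simp
          simp [dfaStep]
          exact ih (i + 2) 1 acc (by omega) (by simpa [pend] using h2)
        · by_cases hL : c = 'l'
          · subst hL
            simp [dfaStep]
            exact ih i 3 acc (by omega) (by simpa [pend] using h)
          · rw [loopA_step h]; simp only [List.take]; simp [hL]
            rw [loopA_step h1]; simp only [List.take]; simp
            rw [loopA_step h2]; simp [List.take, dfaStep, hG, hP, hL]
            exact ih (i + 3) 0 acc (by omega)
              (by simpa [pend, show i + 2 + 1 = i + 3 by omega] using drop_cons h2)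
    · -- state 3: drop i = '(' :: 'a' :: 'l' :: c :: rest'
      have h1 : cs.drop (i + 1) = 'a' :: 'l' :: c :: rest' := drop_cons h
      have h2 : cs.drop (i + 2) = 'l' :: c :: rest' := by
        simpa [show i + 1 + 1 = i + 2 by omega] using drop_cons h1
      have h3 : cs.drop (i + 3) = c :: rest' := by
        simpa [show i + 2 + 1 = i + 3 by omega] using drop_cons h2
      by_cases hR : c = ')'
      · subst hR
        rw [loopA_step h]; simp only [List.take]; simp
        simp [dfaStep]
        exact ih (i + 4) 0 (acc ++ ['a', 'l']) (by omega)
          (by simpa [pend, show i + 3 + 1 = i + 4 by omega] using drop_cons h3)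
      · by_cases hG : c = 'G'
        · subst hG
          rw [loopA_step h]; simp only [List.take]; simp
          rw [loopA_step h1]; simp only [List.take]; simp
          rw [loopA_step h2]; simp only [List.take]; simp
          rw [loopA_step h3]; simp [dfaStep]
          exact ih (i + 4) 0 (acc ++ ['G']) (by omega)
            (by simpa [pend, show i + 3 + 1 = i + 4 by omega] using drop_cons h3)
        · by_cases hP : c = '('
          · subst hP
            rw [loopA_step h]; simp only [List.take]; simp
            rw [loopA_step h1]; simp only [List.take]; simp
            rw [loopA_step h2]; simp only [List.take]; simp
            simp [dfaStep]
            exact ih (i + 3) 1 acc (by omega) (by simpa [pend] using h3)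
          · rw [loopA_step h]; simp only [List.take]; simp [hR]
            rw [loopA_step h1]; simp only [List.take]; simp
            rw [loopA_step h2]; simp only [List.take]; simp
            rw [loopA_step h3]; simp [List.take, dfaStep, hG, hP, hR]
            exact ih (i + 4) 0 acc (by omega)
              (by simpa [pend, show i + 3 + 1 = i + 4 by omega] using drop_cons h3)

-- ===== VERDICT (by name: the statement is the Claim_ definition above) =====
theorem interpret4_spec : Claim_equal_interpret4 := by
  intro command _
  unfold Spec_interpret4 interpret4 interpret4_alt
  rw [main_inv command.toList command.toList 0 0 [] (by omega) (by simp [pend])]
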